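-- pv_equiv track=rewrite | github.com/mariuseb/bacsaas | code/python/cultural_tests/Data/logg/analyse.py | search_tags
-- ===== SOURCE A (Python) =====
-- def search_tags(search_list, system=None, subsystem=None, component=None):
--
--     # search system
--     if system is None:
--         res_tags = search_list
--     else:
--         res_tags = [x for x in search_list if f'_{system}_' in x]
--
--     # search subsystem
--     if subsystem is None:
--         res_tags = res_tags
--     else:
--         res_tags = [x for x in res_tags if f'_{subsystem}_' in x]
--
--     # search component id
--     if component is None:
--         res_tags = res_tags
--     else:
--         res_tags = [x for x in res_tags if f'{component}' in x]
--
--     return res_tags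
-- ===== SOURCE B (Python) =====
-- def search_tags(search_list, system=None, subsystem=None, component=None):
--     # build the list of required substrings once, then one explicit scan
--     needles = []
--     if system is not None:
--         needles.append(f'_{system}_')
--     if subsystem is not None:
--         needles.append(f'_{subsystem}_')
--     if component is not None:
--         needles.append(f'{component}')
--     if not needles:
--         return search_list
--     out = []
--     for x in search_list:
--         if all(n in x for n in needles):
--             out.append(x)
--     return out
-- ===== Notes on version B (the rewrite author's own statement) =====
-- stated objective: alternative
-- what changed: Instead of A's three sequential filtering passes with intermediate lists, B first builds the list of required needle substrings from the non-None filters and then makes one explicit scan keeping elements containing all needles (returning the input list itself when there are no needles).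
import Mathlib
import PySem

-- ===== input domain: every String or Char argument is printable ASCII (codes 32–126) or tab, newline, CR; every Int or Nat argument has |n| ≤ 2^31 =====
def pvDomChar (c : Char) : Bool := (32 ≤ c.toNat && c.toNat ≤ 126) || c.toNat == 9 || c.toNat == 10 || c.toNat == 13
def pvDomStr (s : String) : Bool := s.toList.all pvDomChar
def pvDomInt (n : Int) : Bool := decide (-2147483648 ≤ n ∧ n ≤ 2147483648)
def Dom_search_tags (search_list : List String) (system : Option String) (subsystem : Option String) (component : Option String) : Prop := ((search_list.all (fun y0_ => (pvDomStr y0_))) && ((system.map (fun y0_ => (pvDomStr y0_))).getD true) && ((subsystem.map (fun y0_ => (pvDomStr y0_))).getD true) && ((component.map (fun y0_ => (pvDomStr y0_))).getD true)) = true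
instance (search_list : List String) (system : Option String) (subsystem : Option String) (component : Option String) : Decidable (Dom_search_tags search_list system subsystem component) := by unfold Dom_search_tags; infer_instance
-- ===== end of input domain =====

-- B builds the list of required needle substrings once and makes one explicit scan with an accumulator, replacing A's three sequential filtering passes (objective: alternative).


-- ===== PORT A =====
def search_tags (search_list : List String) (system : Option String) (subsystem : Option String) (component : Option String) : List String :=
  -- search system
  let res1 : List String :=
    match system with
    | none => search_list
    | some s => search_list.filter (fun x => PySem.Str.isIn ("_" ++ s ++ "_") x)
  -- search subsystem
  let res2 : List String :=
    match subsystem with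
    | none => res1
    | some s => res1.filter (fun x => PySem.Str.isIn ("_" ++ s ++ "_") x)
  -- search component id
  match component with
  | none => res2
  | some c => res2.filter (fun x => PySem.Str.isIn c x)

-- ===== PORT B =====
-- the explicit scan: keep x when every needle occurs in x
def searchTagsScan (needles : List String) : List String → List String
  | [] => []
  | x :: rest =>
    if needles.all (fun n => PySem.Str.isIn n x) then
      x :: searchTagsScan needles rest
    else
      searchTagsScan needles rest

def search_tags_alt (search_list : List String) (system : Option String) (subsystem : Option String) (component : Option String) : List String :=
  let needles : List String :=
    (match system with | none => [] | some s => ["_" ++ s ++ "_"]) ++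
    (match subsystem with | none => [] | some s => ["_" ++ s ++ "_"]) ++
    (match component with | none => [] | some c => [c])
  if needles.isEmpty then search_list
  else searchTagsScan needles search_list

-- ===== PRECONDITION & SPEC =====
def Spec_search_tags (search_list : List String) (system : Option String) (subsystem : Option String) (component : Option String) (out : List String) : Prop := out = search_tags_alt search_list system subsystem component
instance (search_list : List String) (system : Option String) (subsystem : Option String) (component : Option String) (out : List String) : Decidable (Spec_search_tags search_list system subsystem component out) := by unfold Spec_search_tags; infer_instance

-- ===== CLAIM (what is proved, stated in full; the proofs are below) =====
def Claim_equal_search_tags : Prop := ∀ (search_list : List String) (system : Option String) (subsystem : Option String) (component : Option String), Dom_search_tags search_list system subsystem component → Spec_search_tags search_list system subsystem component (search_tags search_list system subsystem component)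

-- ===== LEMMAS AND PROOFS =====
theorem searchTagsScan_eq_filter (needles : List String) (xs : List String) :
    searchTagsScan needles xs = xs.filter (fun x => needles.all (fun n => PySem.Str.isIn n x)) := by
  induction xs with
  | nil => rfl
  | cons x rest ih => simp [searchTagsScan, List.filter_cons, ih]

-- ===== VERDICT (by name: the statement is the Claim_ definition above) =====
theorem search_tags_spec : Claim_equal_search_tags := by
  intro sl system subsystem component _
  unfold Spec_search_tags search_tags search_tags_alt
  rcases system with _ | s <;> rcases subsystem with _ | t <;> rcases component with _ | c <;>
    simp [searchTagsScan_eq_filter, List.filter_filter, Bool.and_comm, Bool.and_assoc]
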